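-- pv_equiv track=rewrite | github.com/nikhilch98/ScalerAcademy | Array/MinimumOperationsOfGivenTypeToMakeAllElementsOfAMatrixEqual/MinimumOperationsOfGivenTypeToMakeAllElementsOfAMatrixEqual.py | solve
-- ===== SOURCE A (Python) =====
-- def solve(A, B):
--     arr = []
--     for val in A:
--         arr.extend(val)
--     arr.sort()
--     res = 0
--     res_val = arr[len(arr)//2]
--     for row in A:
--         for val in row:
--             if abs(val-res_val)%B!=0:
--                 return -1
--             res +=abs(val-res_val)//B
--     return res
-- ===== SOURCE B (Python) =====
-- def _select(arr, k):
--     # iterative quickselect (middle-element pivot): k-th smallest, no sorting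
--     while True:
--         p = arr[len(arr) // 2]
--         lt = [v for v in arr if v < p]
--         if k < len(lt):
--             arr = lt
--             continue
--         eq = len([v for v in arr if v == p])
--         if k < len(lt) + eq:
--             return p
--         k -= len(lt) + eq
--         arr = [v for v in arr if v > p]
--
--
-- def solve(A, B):
--     arr = [v for row in A for v in row]
--     m = _select(arr, len(arr) // 2)
--     r = m % B
--     if any(v % B != r for v in arr):
--         return -1
--     return sum(abs(v - m) for v in arr) // B
-- ===== Notes on version B (the rewrite author's own statement) =====
-- stated objective: alternative
-- what changed: Replaces the full sort + per-element abs/mod/floordiv accumulation with an iterative quickselect (three-way partition, middle pivot) that finds the n//2-th order statistic without sorting, then a single residue check against the median and one division of the summed absolute deviations.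
import Mathlib
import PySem

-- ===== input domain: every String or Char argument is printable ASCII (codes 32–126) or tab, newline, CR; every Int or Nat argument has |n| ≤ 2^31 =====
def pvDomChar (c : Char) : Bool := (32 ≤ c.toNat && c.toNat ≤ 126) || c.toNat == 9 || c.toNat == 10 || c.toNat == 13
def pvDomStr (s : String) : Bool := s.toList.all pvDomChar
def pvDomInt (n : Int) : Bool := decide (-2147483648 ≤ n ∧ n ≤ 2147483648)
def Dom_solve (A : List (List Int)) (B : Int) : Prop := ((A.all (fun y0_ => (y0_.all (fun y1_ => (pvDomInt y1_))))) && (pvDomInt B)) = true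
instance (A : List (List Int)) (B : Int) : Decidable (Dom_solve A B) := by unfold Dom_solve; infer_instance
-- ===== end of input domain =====

-- B replaces A's full sort + per-element abs/mod/floordiv accumulation loop by an iterative
-- quickselect (three-way partition, middle pivot) for the n//2-th order statistic, one residue
-- check against that value, and a single division of the summed absolute deviations.

-- ===== PORT A =====
-- inner 'for val in row' loop; none = the early 'return -1'
def solveRow (resVal B : Int) : List Int → Int → Option Int
  | [], res => some res
  | v :: vs, res =>
    if PySem.Int.mod |v - resVal| B ≠ 0 then none
    else solveRow resVal B vs (res + PySem.Int.floordiv |v - resVal| B)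

-- outer 'for row in A' loop
def solveRows (resVal B : Int) : List (List Int) → Int → Option Int
  | [], res => some res
  | row :: rest, res =>
    match solveRow resVal B row res with
    | none => none
    | some res' => solveRows resVal B rest res'

def solve (A : List (List Int)) (B : Int) : Int :=
  let arr := A.foldl (fun acc val => acc ++ val) []
  let arr := PySem.List.sorted arr (fun x => x) false
  let resVal := PySem.List.pyGetD arr (PySem.Int.floordiv (arr.length : Int) 2) 0
  match solveRows resVal B A 0 with
  | none => -1
  | some res => res

-- ===== PORT B =====
-- termination facts for pySelect's recursion (the port cites them in decreasing_by)
theorem length_filter_lt_of_mem {α : Type} {l : List α} {q : α → Bool} {p : α}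
    (hp : p ∈ l) (hq : q p = false) : (l.filter q).length < l.length := by
  induction l with
  | nil => cases hp
  | cons x xs ih =>
    rcases List.mem_cons.1 hp with rfl | h
    · simpa [List.filter_cons, hq] using Nat.lt_succ_of_le (List.length_filter_le _ _)
    · by_cases hx : q x
      · simpa [List.filter_cons, hx] using Nat.succ_lt_succ (ih h)
      · simpa [List.filter_cons, hx] using Nat.lt_succ_of_lt (ih h)

theorem cons_getD_mid_mem (x : Int) (xs : List Int) :
    (x :: xs).getD ((x :: xs).length / 2) 0 ∈ x :: xs := by
  rw [List.getD_eq_getElem _ _ (by simp; omega)]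
  exact List.getElem_mem _

theorem length_filter_attach_lt {α : Type} (l : List α) (q : α → Bool) (p : α)
    (hp : p ∈ l) (hq : q p = false) :
    (List.filter (fun x : {x // x ∈ l} => q x.val) l.attach).unattach.length < l.length := by
  have h2 : (List.filter (fun x : {x // x ∈ l} => q x.val) l.attach).unattach.length
      = (l.filter q).length := by
    simp [List.unattach_filter]
  exact h2 ▸ length_filter_lt_of_mem hp hq

-- Source B's while-loop quickselect, as the corresponding recursion on the shrinking list;
-- the [] case is unreachable under Pre_ (Python raises IndexError there)
def pySelect (l : List Int) (k : Nat) : Int :=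
  if hne : l = [] then 0
  else
    let p := l.getD (l.length / 2) 0
    let lt := l.filter (fun v => v < p)
    if k < lt.length then pySelect lt k
    else
      let eq := (l.filter (fun v => v = p)).length
      if k < lt.length + eq then p
      else pySelect (l.filter (fun v => p < v)) (k - (lt.length + eq))
termination_by l.length
decreasing_by
  · obtain ⟨x, xs, rfl⟩ := List.exists_cons_of_ne_nil hne
    exact length_filter_attach_lt _ (fun v => decide (v < (x :: xs).getD ((x :: xs).length / 2) 0))
      _ (cons_getD_mid_mem x xs) (by simp)
  · obtain ⟨x, xs, rfl⟩ := List.exists_cons_of_ne_nil hne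
    exact length_filter_attach_lt _ (fun v => decide ((x :: xs).getD ((x :: xs).length / 2) 0 < v))
      _ (cons_getD_mid_mem x xs) (by simp)

def solve_alt (A : List (List Int)) (B : Int) : Int :=
  let arr := A.flatMap (fun row => row)
  let m := pySelect arr (arr.length / 2)
  let r := PySem.Int.mod m B
  if arr.any (fun v => PySem.Int.mod v B ≠ r) then -1
  else PySem.Int.floordiv ((arr.map (fun v => |v - m|)).sum) B

-- ===== PRECONDITION & SPEC =====
-- Pre_ excludes exactly the inputs where A raises: an empty flattened matrix (IndexError
-- on arr[len(arr)//2]) and B = 0 (ZeroDivisionError); B raises on those inputs as well.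
def Pre_solve (A : List (List Int)) (B : Int) : Prop := A.flatMap (fun row => row) ≠ [] ∧ B ≠ 0
instance (A : List (List Int)) (B : Int) : Decidable (Pre_solve A B) := by unfold Pre_solve; infer_instance
def pvWitness_solve : List (List Int) × Int := ([[3, 1], [5]], 2)
def Spec_solve (A : List (List Int)) (B : Int) (out : Int) : Prop := out = solve_alt A B
instance (A : List (List Int)) (B : Int) (out : Int) : Decidable (Spec_solve A B out) := by unfold Spec_solve; infer_instance

-- ===== CLAIM (what is proved, stated in full; the proofs are below) =====
def Claim_equal_solve : Prop := ∀ (A : List (List Int)) (B : Int), Dom_solve A B → Pre_solve A B → Spec_solve A B (solve A B)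

-- ===== LEMMAS AND PROOFS =====

-- flattening: A's foldl-extend equals flatMap
theorem foldl_append_flatMap (A : List (List Int)) (acc : List Int) :
    A.foldl (fun acc val => acc ++ val) acc = acc ++ A.flatMap (fun row => row) := by
  induction A generalizing acc with
  | nil => simp
  | cons r rest ih => simp [List.foldl, ih]

-- A's double loop equals the single loop over the flattened list
theorem solveRow_append (m B : Int) (xs ys : List Int) (res : Int) :
    solveRow m B (xs ++ ys) res =
      match solveRow m B xs res with
      | none => none
      | some r => solveRow m B ys r := by
  induction xs generalizing res with
  | nil => simp [solveRow]
  | cons v vs ih =>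
    simp only [List.cons_append, solveRow]
    split_ifs with h <;> simp [ih]

theorem solveRows_eq_flat (m B : Int) (A : List (List Int)) (res : Int) :
    solveRows m B A res = solveRow m B (A.flatMap (fun row => row)) res := by
  induction A generalizing res with
  | nil => simp [solveRows, solveRow]
  | cons r rest ih =>
    simp only [List.flatMap_cons, solveRows, solveRow_append]
    cases solveRow m B r res with
    | none => rfl
    | some r' => simp [ih]

-- floor-division is exact division under divisibility
theorem floordiv_of_dvd (a B : Int) (hB : B ≠ 0) (h : B ∣ a) :
    PySem.Int.floordiv a B = a / B := by
  have h0 : PySem.Int.mod a B = 0 := (PySem.Int.mod_eq_zero_iff_dvd a B).2 h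
  have hmul := PySem.Int.floordiv_mul_add_mod a B
  rw [h0, add_zero] at hmul
  calc PySem.Int.floordiv a B = (PySem.Int.floordiv a B * B) / B := (Int.mul_ediv_cancel _ hB).symm
    _ = a / B := by rw [hmul]

-- equal residues mod B ↔ B divides the difference
theorem mod_eq_mod_iff (x y B : Int) (hB : B ≠ 0) :
    PySem.Int.mod x B = PySem.Int.mod y B ↔ B ∣ (x - y) := by
  have hx := PySem.Int.floordiv_mul_add_mod x B
  have hy := PySem.Int.floordiv_mul_add_mod y B
  constructor
  · intro h
    refine ⟨PySem.Int.floordiv x B - PySem.Int.floordiv y B, ?_⟩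
    have : x - y = (PySem.Int.floordiv x B * B + PySem.Int.mod x B)
        - (PySem.Int.floordiv y B * B + PySem.Int.mod y B) := by rw [hx, hy]
    rw [this, h]; ring
  · rintro ⟨c, hc⟩
    have hdvd : B ∣ (PySem.Int.mod x B - PySem.Int.mod y B) := by
      refine ⟨c - (PySem.Int.floordiv x B - PySem.Int.floordiv y B), ?_⟩
      linear_combination hc + hx - hy
    have habs : |PySem.Int.mod x B - PySem.Int.mod y B| < |B| := by
      rcases lt_or_gt_of_ne hB with hneg | hpos
      · have bx := PySem.Int.mod_neg_bounds (a := x) hneg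
        have by' := PySem.Int.mod_neg_bounds (a := y) hneg
        rw [abs_of_neg hneg, abs_lt]
        omega
      · have bx1 := PySem.Int.mod_nonneg (a := x) hpos
        have bx2 := PySem.Int.mod_lt (a := x) hpos
        have by1 := PySem.Int.mod_nonneg (a := y) hpos
        have by2 := PySem.Int.mod_lt (a := y) hpos
        rw [abs_of_pos hpos, abs_lt]
        omega
    have hz := Int.eq_zero_of_abs_lt_dvd ((abs_dvd _ _).2 hdvd) habs
    omega

-- A's inner loop value when every deviation is divisible
theorem solveRow_all_dvd (m B : Int) (hB : B ≠ 0) (l : List Int) (res : Int)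
    (h : ∀ v ∈ l, B ∣ (v - m)) :
    solveRow m B l res = some (res + (l.map (fun v => |v - m| / B)).sum) := by
  induction l generalizing res with
  | nil => simp [solveRow]
  | cons v vs ih =>
    have hv : B ∣ |v - m| := (dvd_abs _ _).2 (h v (by simp))
    have hmod : PySem.Int.mod |v - m| B = 0 := (PySem.Int.mod_eq_zero_iff_dvd _ _).2 hv
    rw [solveRow, if_neg (by simp [hmod]),
      ih _ (fun w hw => h w (by simp [hw])), floordiv_of_dvd _ _ hB hv]
    simp only [List.map_cons, List.sum_cons]
    congr 1
    ring

-- A's inner loop returns none when some deviation is not divisible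
theorem solveRow_not_dvd (m B : Int) (l : List Int) (res : Int)
    (h : ∃ v ∈ l, ¬ B ∣ (v - m)) :
    solveRow m B l res = none := by
  induction l generalizing res with
  | nil => simp at h
  | cons v vs ih =>
    by_cases hv : PySem.Int.mod |v - m| B = 0
    · have hvd : B ∣ (v - m) := (dvd_abs _ _).1 ((PySem.Int.mod_eq_zero_iff_dvd _ _).1 hv)
      obtain ⟨w, hw, hwd⟩ := h
      rcases List.mem_cons.1 hw with rfl | hwvs
      · exact absurd hvd hwd
      · rw [solveRow, if_neg (by simp [hv])]
        exact ih _ ⟨w, hwvs, hwd⟩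
    · rw [solveRow, if_pos hv]

-- sum of exact quotients = quotient of the sum
theorem sum_div (B : Int) (hB : B ≠ 0) (l : List Int) (f : Int → Int)
    (h : ∀ v ∈ l, B ∣ f v) :
    (l.map (fun v => f v / B)).sum = (l.map f).sum / B := by
  induction l with
  | nil => simp
  | cons v vs ih =>
    obtain ⟨c, hc⟩ := h v (by simp)
    obtain ⟨d, hd⟩ : B ∣ (vs.map f).sum :=
      List.dvd_sum (by rintro x hx; obtain ⟨w, hw, rfl⟩ := List.mem_map.1 hx; exact h w (by simp [hw]))
    rw [List.map_cons, List.sum_cons, List.map_cons, List.sum_cons,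
      ih (fun w hw => h w (by simp [hw])), hc, hd, ← mul_add,
      Int.mul_ediv_cancel_left _ hB, Int.mul_ediv_cancel_left _ hB, Int.mul_ediv_cancel_left _ hB]

-- the sorted list decomposes around any pivot into its three-way partition
theorem sorted_three_way (l : List Int) (p : Int) :
    PySem.List.sorted l (fun x => x) false
      = PySem.List.sorted (l.filter (fun v => decide (v < p))) (fun x => x) false
        ++ l.filter (fun v => decide (v = p))
        ++ PySem.List.sorted (l.filter (fun v => decide (p < v))) (fun x => x) false := by
  apply PySem.List.sorted_id_eq_of_perm_of_pairwise
  · have p1 := PySem.List.sorted_perm (l.filter (fun v => decide (v < p))) (fun x : Int => x) false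
    have p3 := PySem.List.sorted_perm (l.filter (fun v => decide (p < v))) (fun x : Int => x) false
    have h2 : (l.filter (fun v => !decide (v < p))).filter (fun v => decide (v = p))
        = l.filter (fun v => decide (v = p)) := by
      rw [List.filter_filter]
      apply List.filter_congr
      intro a _
      rcases lt_trichotomy a p with h | h | h <;> simp [h, ne_of_gt, ne_of_lt, not_lt.mpr, le_of_lt]
    have h3 : (l.filter (fun v => !decide (v < p))).filter (fun v => !decide (v = p))
        = l.filter (fun v => decide (p < v)) := by
      rw [List.filter_filter]
      apply List.filter_congr
      intro a _
      rcases lt_trichotomy a p with h | h | h <;> simp [h, ne_of_gt, ne_of_lt] <;> omega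
    have A2 := List.filter_append_perm (fun v => decide (v = p)) (l.filter (fun v => !decide (v < p)))
    rw [h2, h3] at A2
    have A1 := List.filter_append_perm (fun v => decide (v < p)) l
    rw [List.append_assoc]
    exact (p1.append ((List.Perm.refl _).append p3)).trans
      (((List.Perm.refl _).append A2).trans A1)
  · have m1 : ∀ a ∈ PySem.List.sorted (l.filter (fun v => decide (v < p))) (fun x : Int => x) false, a < p := by
      intro a ha
      have := (PySem.List.mem_sorted _ _ _ _).1 ha
      simp [List.mem_filter] at this
      exact this.2
    have m2 : ∀ a ∈ l.filter (fun v => decide (v = p)), a = p := by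
      intro a ha; simp [List.mem_filter] at ha; exact ha.2
    have m3 : ∀ a ∈ PySem.List.sorted (l.filter (fun v => decide (p < v))) (fun x : Int => x) false, p < a := by
      intro a ha
      have := (PySem.List.mem_sorted _ _ _ _).1 ha
      simp [List.mem_filter] at this
      exact this.2
    rw [List.pairwise_append, List.pairwise_append]
    refine ⟨⟨PySem.List.sorted_pairwise _ _, ?_, ?_⟩, PySem.List.sorted_pairwise _ _, ?_⟩
    · exact List.pairwise_of_forall_mem_list (fun a ha b hb => by rw [m2 a ha, m2 b hb])
    · intro a ha b hb
      exact le_of_lt (lt_of_lt_of_le (m1 a ha) (le_of_eq (m2 b hb).symm))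
    · intro a ha b hb
      rcases List.mem_append.1 ha with h | h
      · exact le_of_lt (lt_trans (m1 a h) (m3 b hb))
      · exact le_of_lt (lt_of_le_of_lt (le_of_eq (m2 a h)) (m3 b hb))

theorem getD_mid_mem (l : List Int) (hne : l ≠ []) : l.getD (l.length / 2) 0 ∈ l := by
  obtain ⟨x, xs, rfl⟩ := List.exists_cons_of_ne_nil hne
  exact cons_getD_mid_mem x xs

theorem eq_filter_getD (l : List Int) (p : Int) (i : Nat)
    (hi : i < (l.filter (fun v => decide (v = p))).length) :
    (l.filter (fun v => decide (v = p))).getD i 0 = p := by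
  rw [List.getD_eq_getElem _ _ hi]
  have hm := List.getElem_mem hi
  have := (List.mem_filter.1 hm).2
  simpa using this

-- quickselect returns the k-th element of the sorted list
theorem pySelect_eq_sorted : ∀ (n : Nat) (l : List Int), l.length ≤ n → ∀ k, k < l.length →
    pySelect l k = (PySem.List.sorted l (fun x => x) false).getD k 0 := by
  intro n
  induction n with
  | zero => intro l hl k hk; omega
  | succ n ih =>
    intro l hl k hk
    have hne : l ≠ [] := by intro h; subst h; simp at hk
    have hpmem : l.getD (l.length / 2) 0 ∈ l := getD_mid_mem l hne
    rw [pySelect, dif_neg hne, sorted_three_way l (l.getD (l.length / 2) 0)]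
    have hlt : (l.filter (fun v => decide (v < l.getD (l.length / 2) 0))).length < l.length :=
      length_filter_lt_of_mem hpmem (by simp)
    have hgt : (l.filter (fun v => decide (l.getD (l.length / 2) 0 < v))).length < l.length :=
      length_filter_lt_of_mem hpmem (by simp)
    have hslt : (PySem.List.sorted (l.filter (fun v => decide (v < l.getD (l.length / 2) 0))) (fun x : Int => x) false).length
        = (l.filter (fun v => decide (v < l.getD (l.length / 2) 0))).length :=
      (PySem.List.sorted_perm _ _ _).length_eq
    have hsgt : (PySem.List.sorted (l.filter (fun v => decide (l.getD (l.length / 2) 0 < v))) (fun x : Int => x) false).length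
        = (l.filter (fun v => decide (l.getD (l.length / 2) 0 < v))).length :=
      (PySem.List.sorted_perm _ _ _).length_eq
    have hlen : (l.filter (fun v => decide (v < l.getD (l.length / 2) 0))).length
        + (l.filter (fun v => decide (v = l.getD (l.length / 2) 0))).length
        + (l.filter (fun v => decide (l.getD (l.length / 2) 0 < v))).length = l.length := by
      have hc := congrArg List.length (sorted_three_way l (l.getD (l.length / 2) 0))
      have hsl : (PySem.List.sorted l (fun x : Int => x) false).length = l.length :=
        (PySem.List.sorted_perm _ _ _).length_eq
      simp only [List.length_append, hslt, hsgt, hsl] at hc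
      omega
    by_cases h1 : k < (l.filter (fun v => decide (v < l.getD (l.length / 2) 0))).length
    · rw [if_pos h1, List.getD_append _ _ _ _ (by simp only [List.length_append, hslt]; omega),
        List.getD_append _ _ _ _ (by rw [hslt]; exact h1)]
      exact ih _ (by omega) k h1
    · rw [if_neg h1]
      by_cases h2 : k < (l.filter (fun v => decide (v < l.getD (l.length / 2) 0))).length
          + (l.filter (fun v => decide (v = l.getD (l.length / 2) 0))).length
      · rw [if_pos h2, List.getD_append _ _ _ _ (by simp only [List.length_append, hslt]; omega),
          List.getD_append_right _ _ _ _ (by rw [hslt]; omega)]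
        rw [hslt]
        exact (eq_filter_getD l _ _ (by omega)).symm
      · rw [if_neg h2, List.getD_append_right _ _ _ _ (by simp only [List.length_append, hslt]; omega)]
        have harith : k - (PySem.List.sorted (l.filter (fun v => decide (v < l.getD (l.length / 2) 0))) (fun x : Int => x) false
            ++ l.filter (fun v => decide (v = l.getD (l.length / 2) 0))).length
            = k - ((l.filter (fun v => decide (v < l.getD (l.length / 2) 0))).length
              + (l.filter (fun v => decide (v = l.getD (l.length / 2) 0))).length) := by
          simp only [List.length_append, hslt]
        rw [harith]
        exact ih _ (by omega) _ (by omega)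

-- the main equivalence, assuming the precondition
theorem solve_eq_core (A : List (List Int)) (B : Int)
    (hne : A.flatMap (fun row => row) ≠ []) (hB : B ≠ 0) :
    solve A B = solve_alt A B := by
  have hperm : (PySem.List.sorted (A.flatMap (fun row => row)) (fun x => x) false).Perm
      (A.flatMap (fun row => row)) := PySem.List.sorted_perm _ _ _
  set F := A.flatMap (fun row => row) with hF
  set s := PySem.List.sorted F (fun x => x) false with hsdef
  have hlen : s.length = F.length := hperm.length_eq
  have hpos : 0 < F.length := List.length_pos_of_ne_nil hne
  have hsel : pySelect F (F.length / 2) = s.getD (F.length / 2) 0 :=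
    pySelect_eq_sorted F.length F le_rfl _ (Nat.div_lt_self hpos (by norm_num))
  have hfd2 : PySem.Int.floordiv ((s.length : Nat) : Int) 2 = ((s.length / 2 : Nat) : Int) := by
    exact_mod_cast PySem.Int.floordiv_natCast s.length 2
  have hres : PySem.List.pyGetD s (PySem.Int.floordiv ((s.length : Nat) : Int) 2) 0
      = s.getD (F.length / 2) 0 := by
    rw [hfd2, PySem.List.pyGetD_natCast, hlen]
  set m := s.getD (F.length / 2) 0 with hm
  have hmmem : m ∈ F := by
    rw [hm]
    have : s.getD (F.length / 2) 0 ∈ s := by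
      rw [List.getD_eq_getElem _ _ (by omega)]
      exact List.getElem_mem _
    exact hperm.mem_iff.1 this
  simp only [solve, solve_alt]
  rw [foldl_append_flatMap, List.nil_append, ← hF, ← hsdef, hres, hsel, solveRows_eq_flat, ← hF]
  by_cases hall : ∀ v ∈ F, B ∣ (v - m)
  · have hany : (F.any fun v => PySem.Int.mod v B ≠ PySem.Int.mod m B) = false := by
      simp only [List.any_eq_false, ne_eq, decide_not, Bool.not_eq_true', decide_eq_false_iff_not,
        not_not]
      intro v hv
      exact (mod_eq_mod_iff v m B hB).2 (hall v hv)
    rw [solveRow_all_dvd _ _ hB _ _ hall, hany]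
    simp only [Bool.false_eq_true, if_false, zero_add]
    have hdvd_abs : ∀ v ∈ F, B ∣ |v - m| := fun v hv => (dvd_abs _ _).2 (hall v hv)
    have htot : B ∣ (F.map (fun v => |v - m|)).sum :=
      List.dvd_sum (by
        rintro x hx
        obtain ⟨w, hw, rfl⟩ := List.mem_map.1 hx
        exact hdvd_abs w hw)
    rw [floordiv_of_dvd _ _ hB htot, sum_div B hB _ _ hdvd_abs]
  · obtain ⟨w, hw, hwd⟩ : ∃ v ∈ F, ¬ B ∣ (v - m) := by
      push Not at hall
      exact hall
    rw [solveRow_not_dvd _ _ _ _ ⟨w, hw, hwd⟩]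
    have hany : (F.any fun v => PySem.Int.mod v B ≠ PySem.Int.mod m B) = true := by
      simp only [List.any_eq_true, ne_eq, decide_not, Bool.not_eq_true', decide_eq_false_iff_not]
      exact ⟨w, hw, fun hc => hwd ((mod_eq_mod_iff w m B hB).1 hc)⟩
    rw [hany]
    simp

-- ===== VERDICT (by name: the statement is the Claim_ definition above) =====
theorem solve_spec : Claim_equal_solve := by
  intro A B _ hpre
  exact solve_eq_core A B hpre.1 hpre.2
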